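-- pv_equiv track=rewrite | github.com/pypi-data/pypi-mirror-365 | packages/helmkit/helmkit-0.3.2.tar.gz/helmkit-0.3.2/src/helmkit/molecule.py | _split_sequence_with_brackets
-- ===== SOURCE A (Python) =====
-- from typing import List
--
-- def _split_sequence_with_brackets(sequence: str) -> List[str]:
--     """Split a sequence into individual monomers, respecting brackets."""
--     result = []
--     current = ""
--     bracket_depth = 0
--
--     for char in sequence:
--         if char == "[":
--             bracket_depth += 1
--             current += char
--         elif char == "]":
--             bracket_depth -= 1
--             current += char
--         elif char == "." and bracket_depth == 0:
--             result.append(current)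
--             current = ""
--         else:
--             current += char
--
--     if current:
--         result.append(current)
--
--     return result
-- ===== SOURCE B (Python) =====
-- def _split_sequence_with_brackets(sequence):
--     """Split a sequence into individual monomers, respecting brackets."""
--     result = []
--     buf = []
--     bal = 0
--     for part in sequence.split('.'):
--         buf.append(part)
--         bal += part.count('[') - part.count(']')
--         if bal == 0:
--             result.append('.'.join(buf))
--             buf = []
--     if buf:
--         result.append('.'.join(buf))
--     if result and result[-1] == '':
--         result.pop()
--     return result
-- ===== Notes on version B (the rewrite author's own statement) =====
-- stated objective: faster
-- what changed: A scans character by character in Python maintaining a bracket depth and cutting at depth-zero dots; B delegates the scan to the C-level str.split, str.count and str.join primitives, folding over the dot-separated parts with a running bracket balance, re-joining buffered parts while the balance is non-zero and dropping a trailing empty segment at the end.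
import Mathlib
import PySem

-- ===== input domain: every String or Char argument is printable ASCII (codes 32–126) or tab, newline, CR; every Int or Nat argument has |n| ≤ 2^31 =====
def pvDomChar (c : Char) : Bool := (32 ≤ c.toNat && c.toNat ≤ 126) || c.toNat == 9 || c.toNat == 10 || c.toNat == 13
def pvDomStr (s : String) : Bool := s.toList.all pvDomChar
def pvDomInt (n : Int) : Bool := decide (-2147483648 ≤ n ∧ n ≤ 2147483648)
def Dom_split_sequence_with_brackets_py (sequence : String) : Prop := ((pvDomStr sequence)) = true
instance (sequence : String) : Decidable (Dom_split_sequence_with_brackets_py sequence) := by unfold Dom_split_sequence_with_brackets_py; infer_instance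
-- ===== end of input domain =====

-- B replaces A's character-by-character depth scan by splitting on the dot first and folding
-- over the parts with a running bracket balance (objective: faster, measured).

-- ===== PORT A =====
-- one step of A's `for char in sequence` loop; state = (result, current, bracket_depth)
def pvStepA (st : List (List Char) × List Char × Int) (c : Char) : List (List Char) × List Char × Int :=
  if c = '[' then (st.1, st.2.1 ++ [c], st.2.2 + 1)
  else if c = ']' then (st.1, st.2.1 ++ [c], st.2.2 - 1)
  else if c = '.' ∧ st.2.2 = 0 then (st.1 ++ [st.2.1], [], st.2.2)
  else (st.1, st.2.1 ++ [c], st.2.2)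

def split_sequence_with_brackets_py (sequence : String) : List String :=
  let fin := sequence.toList.foldl pvStepA ([], [], 0)
  (if fin.2.1 ≠ [] then fin.1 ++ [fin.2.1] else fin.1).map String.ofList

-- ===== PORT B =====
-- part.count('[') - part.count(']')
def pvBalance (p : List Char) : Int :=
  (PySem.Chars.count p ['['] : Int) - (PySem.Chars.count p [']'] : Int)

-- one step of B's `for part in sequence.split('.')` loop; state = (result, buf, bal)
def pvStepB (st : List (List Char) × List (List Char) × Int) (p : List Char) :
    List (List Char) × List (List Char) × Int :=
  let buf' := st.2.1 ++ [p]
  let bal' := st.2.2 + pvBalance p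
  if bal' = 0 then (st.1 ++ [PySem.Chars.join ['.'] buf'], [], 0)
  else (st.1, buf', bal')

def split_sequence_with_brackets_py_alt (sequence : String) : List String :=
  let parts := PySem.Chars.splitOn sequence.toList ['.']
  let fin := parts.foldl pvStepB ([], [], 0)
  let result := if fin.2.1 ≠ [] then fin.1 ++ [PySem.Chars.join ['.'] fin.2.1] else fin.1
  (if result ≠ [] ∧ result.getLast? = some [] then result.dropLast else result).map String.ofList

-- ===== PRECONDITION & SPEC =====
def Spec_split_sequence_with_brackets_py (sequence : String) (out : List String) : Prop := out = split_sequence_with_brackets_py_alt sequence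
instance (sequence : String) (out : List String) : Decidable (Spec_split_sequence_with_brackets_py sequence out) := by unfold Spec_split_sequence_with_brackets_py; infer_instance

-- ===== CLAIM (what is proved, stated in full; the proofs are below) =====
def Claim_equal_split_sequence_with_brackets_py : Prop := ∀ (sequence : String), Dom_split_sequence_with_brackets_py sequence → Spec_split_sequence_with_brackets_py sequence (split_sequence_with_brackets_py sequence)

-- ===== LEMMAS AND PROOFS =====

-- reference form of splitting a char list on '.' (proved equal to PySem.Chars.splitOn · ['.'])
def pvSplitAux (pre : List Char) : List Char → List (List Char)
  | [] => [pre]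
  | c :: r => if c = '.' then pre :: pvSplitAux [] r else pvSplitAux (pre ++ [c]) r

lemma pvCountGo (c : Char) (l : List Char) : ∀ (fuel acc : Nat), l.length ≤ fuel →
    PySem.Chars.count.go [c] fuel l acc = acc + l.count c := by
  induction l with
  | nil => intro fuel acc _; cases fuel <;> simp [PySem.Chars.count.go]
  | cons h t ih =>
    intro fuel acc hle
    cases fuel with
    | zero => simp at hle
    | succ f =>
      simp only [PySem.Chars.count.go]
      by_cases hc : c = h
      · subst hc
        rw [if_pos (by simp [List.isPrefixOf])]
        simp only [List.length_cons, List.length_nil, Nat.zero_add, List.drop_succ_cons,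
          List.drop_zero]
        rw [ih f (acc + 1) (by simpa using hle), List.count_cons]
        simp; omega
      · rw [if_neg (by simp [List.isPrefixOf]; exact hc)]
        rw [ih f acc (by simpa using hle), List.count_cons]
        have hhc : ¬h = c := fun hh => hc hh.symm
        simp [hhc]

lemma pvCountSingle (l : List Char) (c : Char) : PySem.Chars.count l [c] = l.count c := by
  simpa [PySem.Chars.count] using pvCountGo c l l.length 0 le_rfl

lemma pvSplitGo (l : List Char) : ∀ (fuel : Nat) (cur : List Char) (acc : List (List Char)),
    l.length < fuel →
    PySem.Chars.splitOn.go ['.'] fuel l cur acc = acc.reverse ++ pvSplitAux cur.reverse l := by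
  induction l with
  | nil =>
    intro fuel cur acc _
    cases fuel <;> simp [PySem.Chars.splitOn.go, pvSplitAux]
  | cons h t ih =>
    intro fuel cur acc hlt
    cases fuel with
    | zero => omega
    | succ f =>
      simp only [PySem.Chars.splitOn.go]
      by_cases hc : h = '.'
      · subst hc
        simp only [List.isPrefixOf]
        simp [ih f [] (cur.reverse :: acc) (by simpa using hlt), pvSplitAux]
      · have : List.isPrefixOf ['.'] (h :: t) = false := by
          simp [List.isPrefixOf]; exact fun hh => hc hh.symm
        simp [this, ih f (h :: cur) acc (by simpa using hlt), pvSplitAux, hc]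

lemma pvSplitOnEq (l : List Char) : PySem.Chars.splitOn l ['.'] = pvSplitAux [] l := by
  simpa [PySem.Chars.splitOn] using pvSplitGo l (l.length + 1) [] [] (by omega)

lemma pvSplitAux_ne_nil (l : List Char) (pre : List Char) : pvSplitAux pre l ≠ [] := by
  induction l generalizing pre with
  | nil => simp [pvSplitAux]
  | cons c r ih => by_cases hc : c = '.' <;> simp [pvSplitAux, hc, ih]

lemma pvJoinSplitAux (l : List Char) : ∀ pre, PySem.Chars.join ['.'] (pvSplitAux pre l) = pre ++ l := by
  induction l with
  | nil => intro pre; simp [pvSplitAux, PySem.Chars.join_singleton]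
  | cons c r ih =>
    intro pre
    by_cases hc : c = '.'
    · subst hc
      have hne := pvSplitAux_ne_nil r []
      rcases hr : pvSplitAux [] r with _ | ⟨q, rest⟩
      · exact absurd hr hne
      · simp [pvSplitAux, hr, PySem.Chars.join_cons_cons]
        have := ih []
        rw [hr] at this
        simp [this]
    · simp [pvSplitAux, hc, ih (pre ++ [c])]

lemma pvSplitAux_dotfree (l : List Char) : ∀ pre, ('.' : Char) ∉ pre →
    ∀ p ∈ pvSplitAux pre l, ('.' : Char) ∉ p := by
  induction l with
  | nil => intro pre hpre p hp; simp [pvSplitAux] at hp; subst hp; exact hpre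
  | cons c r ih =>
    intro pre hpre p hp
    by_cases hc : c = '.'
    · subst hc
      simp [pvSplitAux] at hp
      rcases hp with hp | hp
      · subst hp; exact hpre
      · exact ih [] (by simp) p hp
    · simp [pvSplitAux, hc] at hp
      refine ih (pre ++ [c]) ?_ p hp
      simp [hpre, Ne.symm hc]

-- join over buf ++ [p] peels the last part off
lemma pvJoinSnoc (buf : List (List Char)) (p : List Char) :
    PySem.Chars.join ['.'] (buf ++ [p]) =
      (if buf = [] then [] else PySem.Chars.join ['.'] buf ++ ['.']) ++ p := by
  induction buf with
  | nil => simp [PySem.Chars.join_singleton]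
  | cons x rest ih =>
    rcases rest with _ | ⟨y, rest'⟩
    · simp [PySem.Chars.join_cons_cons, PySem.Chars.join_singleton]
    · simp only [List.cons_append, PySem.Chars.join_cons_cons]
      simp only [List.cons_append] at ih ⊢
      rw [ih]
      simp

-- A's loop over a dot-free chunk just appends it and shifts the depth by its balance
lemma pvScanDotfree (p : List Char) (hdf : ('.' : Char) ∉ p) :
    ∀ (res : List (List Char)) (cur : List Char) (d : Int),
    List.foldl pvStepA (res, cur, d) p = (res, cur ++ p, d + pvBalance p) := by
  induction p with
  | nil => intro res cur d; simp [pvBalance, pvCountSingle]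
  | cons c t ih =>
    intro res cur d
    have hdt : ('.' : Char) ∉ t := fun h => hdf (List.mem_cons_of_mem _ h)
    have hcd : c ≠ '.' := fun h => hdf (h ▸ List.mem_cons_self ..)
    simp only [List.foldl_cons, pvStepA]
    by_cases h1 : c = '['
    · subst h1
      rw [if_pos rfl, ih hdt]
      have hb : pvBalance ('[' :: t) = pvBalance t + 1 := by
        simp [pvBalance, pvCountSingle]; ring
      exact congrArg (Prod.mk res) (congrArg₂ Prod.mk (by simp) (by rw [hb]; ring))
    · by_cases h2 : c = ']'
      · subst h2
        rw [if_neg (by decide), if_pos rfl, ih hdt]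
        have hb : pvBalance (']' :: t) = pvBalance t - 1 := by
          simp [pvBalance, pvCountSingle]; ring
        exact congrArg (Prod.mk res) (congrArg₂ Prod.mk (by simp) (by rw [hb]; ring))
      · rw [if_neg h1, if_neg h2, if_neg (fun h => hcd h.1), ih hdt]
        have hb : pvBalance (c :: t) = pvBalance t := by
          simp [pvBalance, pvCountSingle,
            fun hh : c = '[' => h1 hh, fun hh : c = ']' => h2 hh]
        exact congrArg (Prod.mk res) (congrArg₂ Prod.mk (by simp) (by rw [hb]))

-- the endings of the two loops, named so the induction can talk about them
def pvFinishA (st : List (List Char) × List Char × Int) : List (List Char) :=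
  if st.2.1 ≠ [] then st.1 ++ [st.2.1] else st.1

def pvFinishB (st : List (List Char) × List (List Char) × Int) : List (List Char) :=
  let r := if st.2.1 ≠ [] then st.1 ++ [PySem.Chars.join ['.'] st.2.1] else st.1
  if r ≠ [] ∧ r.getLast? = some [] then r.dropLast else r

-- the current-buffer contents A holds when B's pending buffer is `buf`
def pvCur (buf : List (List Char)) : List Char :=
  if buf = [] then [] else PySem.Chars.join ['.'] buf ++ ['.']

lemma pvCur_snoc (buf : List (List Char)) (p : List Char) :
    pvCur buf ++ p = PySem.Chars.join ['.'] (buf ++ [p]) := by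
  rw [pvJoinSnoc, pvCur]

-- the main correspondence: A scanning the '.'-joined remaining parts from a boundary state
-- equals B folding over those parts, for any boundary state (res, buf, bal)
lemma pvMain (parts : List (List Char)) (hdf : ∀ p ∈ parts, ('.' : Char) ∉ p)
    (hne : parts ≠ []) :
    ∀ (res buf : List (List Char)) (bal : Int),
    pvFinishA (List.foldl pvStepA (res, pvCur buf, bal) (PySem.Chars.join ['.'] parts))
    = pvFinishB (List.foldl pvStepB (res, buf, bal) parts) := by
  induction parts with
  | nil => exact absurd rfl hne
  | cons p rest ih =>
    intro res buf bal
    have hdfp : ('.' : Char) ∉ p := hdf p (List.mem_cons_self ..)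
    rcases rest with _ | ⟨q, rest'⟩
    · -- last part
      rw [PySem.Chars.join_singleton, pvScanDotfree p hdfp, List.foldl_cons, List.foldl_nil]
      by_cases hb : bal + pvBalance p = 0
      · have hs : pvStepB (res, buf, bal) p =
            (res ++ [PySem.Chars.join ['.'] (buf ++ [p])], [], 0) := by
          simp [pvStepB, hb]
        rw [hs]
        simp only [pvFinishA, pvFinishB, ne_eq, not_true_eq_false, if_false, ← pvCur_snoc]
        by_cases hcp : pvCur buf ++ p = [] <;>
          simp [hcp]
      · have hs : pvStepB (res, buf, bal) p =
            (res, buf ++ [p], bal + pvBalance p) := by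
          simp [pvStepB, hb]
        rw [hs]
        have hbne : (buf ++ [p] : List (List Char)) ≠ [] := by simp
        simp only [pvFinishA, pvFinishB, ne_eq, hbne, not_false_eq_true, if_true, ← pvCur_snoc]
        by_cases hcp : pvCur buf ++ p = [] <;>
          simp [hcp]
    · -- interior part, followed by the '.' before the next part
      have hdfr : ∀ x ∈ q :: rest', ('.' : Char) ∉ x :=
        fun x hx => hdf x (List.mem_cons_of_mem _ hx)
      have hsplit : PySem.Chars.join ['.'] (p :: q :: rest')
          = p ++ '.' :: PySem.Chars.join ['.'] (q :: rest') := by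
        rw [PySem.Chars.join_cons_cons]; simp
      rw [hsplit]
      have hA : List.foldl pvStepA (res, pvCur buf, bal) (p ++ '.' :: PySem.Chars.join ['.'] (q :: rest'))
          = List.foldl pvStepA (pvStepA (res, pvCur buf ++ p, bal + pvBalance p) '.')
              (PySem.Chars.join ['.'] (q :: rest')) := by
        rw [List.foldl_append, pvScanDotfree p hdfp, List.foldl_cons]
      rw [hA, List.foldl_cons]
      by_cases hb : bal + pvBalance p = 0
      · have hsA : pvStepA (res, pvCur buf ++ p, bal + pvBalance p) '.'
            = (res ++ [pvCur buf ++ p], [], 0) := by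
          simp [pvStepA, hb]
        have hsB : pvStepB (res, buf, bal) p
            = (res ++ [pvCur buf ++ p], [], 0) := by
          simp [pvStepB, hb, pvCur_snoc]
        rw [hsA, hsB]
        have := ih hdfr (by simp) (res ++ [pvCur buf ++ p]) [] 0
        simpa [pvCur] using this
      · have hsA : pvStepA (res, pvCur buf ++ p, bal + pvBalance p) '.'
            = (res, pvCur buf ++ p ++ ['.'], bal + pvBalance p) := by
          simp [pvStepA, hb]
        have hsB : pvStepB (res, buf, bal) p
            = (res, buf ++ [p], bal + pvBalance p) := by
          simp [pvStepB, hb]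
        rw [hsA, hsB]
        have := ih hdfr (by simp) res (buf ++ [p]) (bal + pvBalance p)
        have hcur : pvCur (buf ++ [p]) = pvCur buf ++ p ++ ['.'] := by
          simp [pvCur, ← pvCur_snoc]
        rw [hcur] at this
        exact this

-- ===== VERDICT (by name: the statement is the Claim_ definition above) =====
theorem split_sequence_with_brackets_py_spec : Claim_equal_split_sequence_with_brackets_py := by
  intro sequence _
  show split_sequence_with_brackets_py sequence = split_sequence_with_brackets_py_alt sequence
  unfold split_sequence_with_brackets_py split_sequence_with_brackets_py_alt
  rw [pvSplitOnEq]
  apply congrArg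
  have h := pvMain (pvSplitAux [] sequence.toList)
    (pvSplitAux_dotfree sequence.toList [] (by simp))
    (pvSplitAux_ne_nil sequence.toList [])
    [] [] 0
  rw [pvJoinSplitAux] at h
  simpa [pvFinishA, pvFinishB, pvCur] using h
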